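-- pv_equiv track=rewrite | github.com/danielyue/observational-studies-phd-course | hf_scraper/src/clean_hf_profiles.py | determine_org_type
-- ===== SOURCE A (Python) =====
-- def determine_org_type(tag_texts: list) -> str:
--     """
--     Determine organization type based on tags.
--
--     Returns: University, Non-Profit, Company, Community, Government, Classroom, or empty string
--     """
--     # Convert tags to lowercase for case-insensitive matching
--     tags_lower = [tag.lower() for tag in tag_texts]
--
--     # Check in priority order
--     if "university" in tags_lower:
--         return "University"
--     elif "non-profit" in tags_lower:
--         return "Non-Profit"
--     elif "company" in tags_lower:
--         return "Company"
--     elif "community" in tags_lower: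
--         return "Community"
--     elif "government" in tags_lower:
--         return "Government"
--     elif "classroom" in tags_lower:
--         return "Classroom"
--     else:
--         return ""
-- ===== SOURCE B (Python) =====
-- _RANKS = {"university": 0, "non-profit": 1, "company": 2, "community": 3,
--           "government": 4, "classroom": 5}
-- _LABELS = ("University", "Non-Profit", "Company", "Community", "Government", "Classroom")
--
--
-- def determine_org_type(tag_texts: list) -> str:
--     """Single pass over the tags, keeping the best (lowest) priority rank seen."""
--     best = len(_LABELS)
--     for tag in tag_texts:
--         r = _RANKS.get(tag.lower())
--         if r is not None and r < best:
--             best = r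
--     return _LABELS[best] if best < len(_LABELS) else ""
-- ===== Notes on version B (the rewrite author's own statement) =====
-- stated objective: alternative
-- what changed: Replaces the six priority-ordered membership scans of the lowercased tag list with a single pass over the tags that keeps a running minimum of each tag's priority rank via a keyword->rank table, indexing a label tuple at the end.
import Mathlib
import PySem

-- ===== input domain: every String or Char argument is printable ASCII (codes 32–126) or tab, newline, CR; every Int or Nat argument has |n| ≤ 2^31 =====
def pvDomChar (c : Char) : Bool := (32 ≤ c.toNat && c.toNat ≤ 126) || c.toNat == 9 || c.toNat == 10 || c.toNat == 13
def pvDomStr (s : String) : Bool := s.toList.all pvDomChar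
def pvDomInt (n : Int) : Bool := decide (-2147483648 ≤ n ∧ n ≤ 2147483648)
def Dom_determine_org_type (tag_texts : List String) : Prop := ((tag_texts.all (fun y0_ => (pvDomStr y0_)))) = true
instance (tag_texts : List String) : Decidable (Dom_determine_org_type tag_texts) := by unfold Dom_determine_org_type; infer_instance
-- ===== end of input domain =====

-- ===== PORT A =====
-- B replaces A's six priority-ordered membership scans by one pass keeping a running minimum rank (alternative decomposition).
def determine_org_type (tag_texts : List String) : String :=
  let tags_lower := tag_texts.map PySem.Str.lower
  if "university" ∈ tags_lower then "University"
  else if "non-profit" ∈ tags_lower then "Non-Profit"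
  else if "company" ∈ tags_lower then "Company"
  else if "community" ∈ tags_lower then "Community"
  else if "government" ∈ tags_lower then "Government"
  else if "classroom" ∈ tags_lower then "Classroom"
  else ""

-- ===== PORT B =====
-- _RANKS.get(tag.lower()) : the keyword -> rank table of Source B
def otRank (s : String) : Option Nat :=
  if s = "university" then some 0
  else if s = "non-profit" then some 1
  else if s = "company" then some 2
  else if s = "community" then some 3
  else if s = "government" then some 4
  else if s = "classroom" then some 5
  else none

-- _LABELS[n] for n < 6
def otLabel (n : Nat) : String :=
  match n with
  | 0 => "University"
  | 1 => "Non-Profit"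
  | 2 => "Company"
  | 3 => "Community"
  | 4 => "Government"
  | 5 => "Classroom"
  | _ => ""

-- one iteration of Source B's loop body
def otStep (best : Nat) (tag : String) : Nat :=
  match otRank (PySem.Str.lower tag) with
  | some r => if r < best then r else best
  | none => best

def determine_org_type_alt (tag_texts : List String) : String :=
  let best := tag_texts.foldl otStep 6
  if best < 6 then otLabel best else ""

-- ===== PRECONDITION & SPEC =====
def Spec_determine_org_type (tag_texts : List String) (out : String) : Prop := out = determine_org_type_alt tag_texts
instance (tag_texts : List String) (out : String) : Decidable (Spec_determine_org_type tag_texts out) := by unfold Spec_determine_org_type; infer_instance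

-- ===== CLAIM (what is proved, stated in full; the proofs are below) =====
def Claim_equal_determine_org_type : Prop := ∀ (tag_texts : List String), Dom_determine_org_type tag_texts → Spec_determine_org_type tag_texts (determine_org_type tag_texts)

-- ===== LEMMAS AND PROOFS =====

-- ===== VERDICT (by name: the statement is the Claim_ definition above) =====
theorem fold_le (l : List String) (b : Nat) : l.foldl otStep b ≤ b := by
  induction l generalizing b with
  | nil => simp
  | cons t l ih =>
    simp only [List.foldl_cons]
    refine le_trans (ih _) ?_
    unfold otStep
    cases otRank (PySem.Str.lower t) with
    | none => simp
    | some r => simp only; split <;> omega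

theorem fold_reached (l : List String) (b : Nat) :
    l.foldl otStep b = b ∨ ∃ t ∈ l, otRank (PySem.Str.lower t) = some (l.foldl otStep b) := by
  induction l generalizing b with
  | nil => left; rfl
  | cons t l ih =>
    simp only [List.foldl_cons]
    rcases ih (otStep b t) with h | ⟨t', ht', hr⟩
    · rw [h]
      unfold otStep
      cases hrt : otRank (PySem.Str.lower t) with
      | none => left; rfl
      | some r =>
        simp only
        split
        · right; exact ⟨t, List.mem_cons_self .., hrt⟩
        · left; rfl
    · right; exact ⟨t', List.mem_cons_of_mem _ ht', hr⟩

theorem fold_le_rank (l : List String) (b : Nat) (t : String) (r : Nat)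
    (ht : t ∈ l) (hr : otRank (PySem.Str.lower t) = some r) : l.foldl otStep b ≤ r := by
  induction l generalizing b with
  | nil => cases ht
  | cons h l ih =>
    simp only [List.foldl_cons]
    rcases List.mem_cons.1 ht with rfl | ht'
    · refine le_trans (fold_le _ _) ?_
      unfold otStep
      rw [hr]
      simp only
      split <;> omega
    · exact ih _ ht'

theorem determine_org_type_spec : Claim_equal_determine_org_type := by
  unfold Claim_equal_determine_org_type Spec_determine_org_type
  intro l _
  unfold determine_org_type determine_org_type_alt
  simp only []
  have hmem : ∀ (kw : String) (k : Nat), (∀ s, otRank s = some k ↔ s = kw) →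
      ((kw ∈ l.map PySem.Str.lower) ↔ ∃ t ∈ l, otRank (PySem.Str.lower t) = some k) := by
    intro kw k hk
    rw [List.mem_map]
    constructor
    · rintro ⟨t, ht, he⟩; exact ⟨t, ht, (hk _).2 he⟩
    · rintro ⟨t, ht, he⟩; exact ⟨t, ht, (hk _).1 he⟩
  have h0 : ∀ s, otRank s = some 0 ↔ s = "university" := by
    intro s; unfold otRank; split_ifs <;> simp_all
  have h1 : ∀ s, otRank s = some 1 ↔ s = "non-profit" := by
    intro s; unfold otRank; split_ifs <;> simp_all
  have h2 : ∀ s, otRank s = some 2 ↔ s = "company" := by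
    intro s; unfold otRank; split_ifs <;> simp_all
  have h3 : ∀ s, otRank s = some 3 ↔ s = "community" := by
    intro s; unfold otRank; split_ifs <;> simp_all
  have h4 : ∀ s, otRank s = some 4 ↔ s = "government" := by
    intro s; unfold otRank; split_ifs <;> simp_all
  have h5 : ∀ s, otRank s = some 5 ↔ s = "classroom" := by
    intro s; unfold otRank; split_ifs <;> simp_all
  set m := l.foldl otStep 6 with hm
  have hle : m ≤ 6 := fold_le l 6
  have hub : ∀ (kw : String) (k : Nat), (∀ s, otRank s = some k ↔ s = kw) →
      kw ∈ l.map PySem.Str.lower → m ≤ k := by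
    intro kw k hk hin
    obtain ⟨t, ht, he⟩ := (hmem kw k hk).1 hin
    exact fold_le_rank l 6 t k ht he
  have hwit : m = 6 ∨ ∃ t ∈ l, otRank (PySem.Str.lower t) = some m := by
    rcases fold_reached l 6 with h | h
    · left; exact h
    · right; exact h
  have hmemm : m < 6 → ∀ (kw : String), (∀ s, otRank s = some m ↔ s = kw) →
      kw ∈ l.map PySem.Str.lower := by
    intro hlt kw hk
    rcases hwit with h | ⟨t, ht, he⟩
    · omega
    · exact List.mem_map.2 ⟨t, ht, (hk _).1 he⟩
  by_cases c0 : "university" ∈ l.map PySem.Str.lower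
  · have := hub _ 0 h0 c0
    have hm0 : m = 0 := by omega
    simp [c0, hm0, otLabel]
  · by_cases c1 : "non-profit" ∈ l.map PySem.Str.lower
    · have := hub _ 1 h1 c1
      have hm1 : m = 1 := by
        interval_cases m
        · exact absurd (hmemm (by omega) _ h0) c0
        · rfl
      simp [c0, c1, hm1, otLabel]
    · by_cases c2 : "company" ∈ l.map PySem.Str.lower
      · have := hub _ 2 h2 c2
        have hm2 : m = 2 := by
          interval_cases m
          · exact absurd (hmemm (by omega) _ h0) c0
          · exact absurd (hmemm (by omega) _ h1) c1
          · rfl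
        simp [c0, c1, c2, hm2, otLabel]
      · by_cases c3 : "community" ∈ l.map PySem.Str.lower
        · have := hub _ 3 h3 c3
          have hm3 : m = 3 := by
            interval_cases m
            · exact absurd (hmemm (by omega) _ h0) c0
            · exact absurd (hmemm (by omega) _ h1) c1
            · exact absurd (hmemm (by omega) _ h2) c2
            · rfl
          simp [c0, c1, c2, c3, hm3, otLabel]
        · by_cases c4 : "government" ∈ l.map PySem.Str.lower
          · have := hub _ 4 h4 c4
            have hm4 : m = 4 := by
              interval_cases m
              · exact absurd (hmemm (by omega) _ h0) c0
              · exact absurd (hmemm (by omega) _ h1) c1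
              · exact absurd (hmemm (by omega) _ h2) c2
              · exact absurd (hmemm (by omega) _ h3) c3
              · rfl
            simp [c0, c1, c2, c3, c4, hm4, otLabel]
          · by_cases c5 : "classroom" ∈ l.map PySem.Str.lower
            · have := hub _ 5 h5 c5
              have hm5 : m = 5 := by
                interval_cases m
                · exact absurd (hmemm (by omega) _ h0) c0
                · exact absurd (hmemm (by omega) _ h1) c1
                · exact absurd (hmemm (by omega) _ h2) c2
                · exact absurd (hmemm (by omega) _ h3) c3
                · exact absurd (hmemm (by omega) _ h4) c4
                · rfl
              simp [c0, c1, c2, c3, c4, c5, hm5, otLabel]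
            · have hm6 : m = 6 := by
                interval_cases m
                · exact absurd (hmemm (by omega) _ h0) c0
                · exact absurd (hmemm (by omega) _ h1) c1
                · exact absurd (hmemm (by omega) _ h2) c2
                · exact absurd (hmemm (by omega) _ h3) c3
                · exact absurd (hmemm (by omega) _ h4) c4
                · exact absurd (hmemm (by omega) _ h5) c5
                · rfl
              simp [c0, c1, c2, c3, c4, c5, hm6]
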